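-- pv_equiv track=rewrite | github.com/IDP1102025/IDP2025 | software/navigation/navigation.py | combine_paths
-- ===== SOURCE A (Python) =====
-- def combine_paths(node_path, direction_path):
--     """
--     Given:
--       node_path: [node0, node1, node2, ..., nodeN]  (length N+1)
--       direction_path: [(dir0, 1), (dir1, 1), ..., (dirN-1, 1)] (length N)
--     Merge consecutive steps that have the same dir, and build a final
--     list of nodes + directions.
--     """
--     if not node_path:
--         [], []
--     if len(node_path) == 1:
--         # Only one node, no edges
--         return node_path, node_path
--     if not direction_path:
--         # Means we have nodes but no directions?
--         # Possibly an error or trivial path of 1 node.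
--         return [], []
--
--     # Start with the first node and first direction
--     merged_nodes = [node_path[0]]
--     merged_directions = []
--
--     prev_dir = direction_path[0][0]
--     count_junctions = direction_path[0][1]
--
--     # Walk through directions 1..end
--     for i in range(1, len(direction_path)):
--         d, c = direction_path[i]
--         if d == prev_dir:
--             # Same direction => merge junction counts
--             count_junctions += c
--         else:
--             # Different direction => finalize the previous direction
--             merged_directions.append((prev_dir, count_junctions))
--             # The node at index i is the boundary between steps
--             merged_nodes.append(node_path[i])
--             # Reset direction tracking
--             prev_dir = d
--             count_junctions = c
--
--     # Append the final direction
--     merged_directions.append((prev_dir, count_junctions))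
--     # Append the final node (goal)
--     merged_nodes.append(node_path[-1])
--
--     # Reverse the lists to place the start node at the right
--     merged_nodes.reverse()
--     merged_directions.reverse()
--     return merged_nodes, merged_directions
-- ===== SOURCE B (Python) =====
-- def _runs(direction_path):
--     """Split direction_path into maximal runs of equal direction:
--     returns [(start_index, direction, total_count)] per run."""
--     runs = []
--     i = 0
--     n = len(direction_path)
--     while i < n:
--         d = direction_path[i][0]
--         j = i
--         total = 0
--         while j < n and direction_path[j][0] == d:
--             total += direction_path[j][1]
--             j += 1
--         runs.append((i, d, total))
--         i = j
--     return runs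
--
--
-- def combine_paths(node_path, direction_path):
--     if len(node_path) == 1:
--         return node_path, node_path
--     if not direction_path:
--         return [], []
--     runs = _runs(direction_path)
--     merged_directions = [(d, total) for _, d, total in runs]
--     merged_nodes = ([node_path[0]]
--                     + [node_path[start] for start, _, _ in runs[1:]]
--                     + [node_path[-1]])
--     return merged_nodes[::-1], merged_directions[::-1]
-- ===== Notes on version B (the rewrite author's own statement) =====
-- stated objective: alternative
-- what changed: A merges with one accumulator loop carrying prev-direction/count state; B first splits direction_path into maximal runs (start index, direction, summed count) with a nested run scan, then assembles both outputs by comprehensions over the run list.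
-- outside the precondition, e.g. on combine_paths([5], [('a', 1)]): A returns ([5], [5]), B returns ([5], [5])
import Mathlib
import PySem

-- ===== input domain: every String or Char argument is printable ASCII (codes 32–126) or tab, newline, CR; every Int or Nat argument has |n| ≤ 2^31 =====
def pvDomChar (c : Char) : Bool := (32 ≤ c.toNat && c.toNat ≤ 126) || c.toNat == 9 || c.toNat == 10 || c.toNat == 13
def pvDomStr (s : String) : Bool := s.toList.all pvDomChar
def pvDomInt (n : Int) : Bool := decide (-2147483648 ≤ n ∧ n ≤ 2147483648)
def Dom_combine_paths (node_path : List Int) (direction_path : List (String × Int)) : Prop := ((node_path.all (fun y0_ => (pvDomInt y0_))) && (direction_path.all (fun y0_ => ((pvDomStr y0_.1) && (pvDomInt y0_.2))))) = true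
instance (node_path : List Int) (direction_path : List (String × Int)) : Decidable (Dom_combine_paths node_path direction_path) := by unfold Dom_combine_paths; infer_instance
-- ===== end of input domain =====

-- B re-implements the merge by first splitting direction_path into maximal runs and then
-- assembling both outputs from the run list (alternative decomposition; same cost).


-- ===== PORT A =====
-- `if not node_path: [], []` in A is a no-op expression statement; nothing to port.
-- On len(node_path) == 1 Python returns (node_path, node_path), whose second component is a
-- list of ints, not of the declared (direction, count) type; that branch is excluded by Pre_
-- and the port returns (node_path, []) there.
def combine_paths (node_path : List Int) (direction_path : List (String × Int)) : List Int × (List (String × Int)) :=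
  if node_path.length = 1 then (node_path, [])
  else if direction_path = [] then ([], [])
  else
    let first := PySem.List.pyGetD direction_path 0 ("", 0)
    let st := (PySem.List.pyRange 1 (direction_path.length : Int) 1).foldl
      (fun (s : List Int × List (String × Int) × String × Int) i =>
        let dc := PySem.List.pyGetD direction_path i ("", 0)
        if dc.1 = s.2.2.1 then (s.1, s.2.1, s.2.2.1, s.2.2.2 + dc.2)
        else (s.1 ++ [PySem.List.pyGetD node_path i 0], s.2.1 ++ [(s.2.2.1, s.2.2.2)], dc.1, dc.2))
      ([PySem.List.pyGetD node_path 0 0], [], first.1, first.2)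
    let merged_nodes := st.1 ++ [PySem.List.pyGetD node_path (-1) 0]
    let merged_directions := st.2.1 ++ [(st.2.2.1, st.2.2.2)]
    (merged_nodes.reverse, merged_directions.reverse)

-- ===== PORT B =====
-- B's helper _runs: maximal runs of equal direction as (start_index, direction, total_count).
def pvRuns (direction_path : List (String × Int)) (i : Nat) : List (Nat × String × Int) :=
  match direction_path with
  | [] => []
  | (d, c) :: rest =>
      let grp := rest.takeWhile (fun t => t.1 == d)
      (i, d, c + (grp.map Prod.snd).sum) ::
        pvRuns (rest.dropWhile (fun t => t.1 == d)) (i + 1 + grp.length)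
termination_by direction_path.length
decreasing_by
  simp only [List.length_cons]
  exact Nat.lt_succ_of_le (List.length_dropWhile_le _ _)

-- (the len == 1 branch is the same ill-typed corner as in A; excluded by Pre_, ported as in A)
def combine_paths_alt (node_path : List Int) (direction_path : List (String × Int)) : List Int × (List (String × Int)) :=
  if node_path.length = 1 then (node_path, [])
  else if direction_path = [] then ([], [])
  else
    let runs := pvRuns direction_path 0
    let merged_directions := runs.map (fun r => (r.2.1, r.2.2))
    let merged_nodes := [PySem.List.pyGetD node_path 0 0]
      ++ (runs.drop 1).map (fun r => PySem.List.pyGetD node_path (r.1 : Int) 0)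
      ++ [PySem.List.pyGetD node_path (-1) 0]
    (merged_nodes.reverse, merged_directions.reverse)

-- ===== PRECONDITION & SPEC =====
-- Pre_ excludes (a) length-1 node_path, where A returns (node_path, node_path) whose second
-- component is a list of ints rather than (direction, count) pairs — not a value of the declared
-- return type; and (b) inputs where A raises IndexError: empty node_path with nonempty
-- direction_path, or a direction-change boundary index i with i ≥ len(node_path).
def Pre_combine_paths (node_path : List Int) (direction_path : List (String × Int)) : Prop :=
  node_path.length ≠ 1 ∧ (node_path = [] → direction_path = []) ∧
  (∀ i ∈ List.range direction_path.length, 0 < i →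
     (direction_path.getD i ("", 0)).1 ≠ (direction_path.getD (i - 1) ("", 0)).1 →
     i < node_path.length)
instance (node_path : List Int) (direction_path : List (String × Int)) : Decidable (Pre_combine_paths node_path direction_path) := by unfold Pre_combine_paths; infer_instance

def pvWitness_combine_paths : List Int × (List (String × Int)) := ([1, 2, 3], [("a", 1), ("b", 1)])

def Spec_combine_paths (node_path : List Int) (direction_path : List (String × Int)) (out : List Int × (List (String × Int))) : Prop := out = combine_paths_alt node_path direction_path
instance (node_path : List Int) (direction_path : List (String × Int)) (out : List Int × (List (String × Int))) : Decidable (Spec_combine_paths node_path direction_path out) := by unfold Spec_combine_paths; infer_instance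

-- ===== CLAIM (what is proved, stated in full; the proofs are below) =====
def Claim_equal_combine_paths : Prop := ∀ (node_path : List Int) (direction_path : List (String × Int)), Dom_combine_paths node_path direction_path → Pre_combine_paths node_path direction_path → Spec_combine_paths node_path direction_path (combine_paths node_path direction_path)

-- ===== LEMMAS AND PROOFS =====

-- A's loop, rewritten as a structural fold over the remaining suffix carrying the running index.
def pvFoldE (np : List Int) (k : Nat) (l : List (String × Int))
    (s : List Int × List (String × Int) × String × Int) :
    List Int × List (String × Int) × String × Int :=
  match l with
  | [] => s
  | dc :: t =>
      if dc.1 = s.2.2.1 then pvFoldE np (k + 1) t (s.1, s.2.1, s.2.2.1, s.2.2.2 + dc.2)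
      else pvFoldE np (k + 1) t
        (s.1 ++ [PySem.List.pyGetD np (k : Int) 0], s.2.1 ++ [(s.2.2.1, s.2.2.2)], dc.1, dc.2)

lemma pvDropWhile_head_false {α : Type} (p : α → Bool) :
    ∀ (l : List α) (x : α) (t : List α), l.dropWhile p = x :: t → p x = false := by
  intro l
  induction l with
  | nil => intro x t h; simp [List.dropWhile] at h
  | cons a l ih =>
      intro x t h
      by_cases hp : p a
      · rw [List.dropWhile_cons_of_pos (by simpa using hp)] at h; exact ih x t h
      · rw [List.dropWhile_cons_of_neg (by simpa using hp)] at h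
        cases h; simpa using hp

lemma pvBridge (np : List Int) (dp : List (String × Int)) :
    ∀ (rest : List (String × Int)) (k : Nat) s, dp.drop k = rest →
    (PySem.List.pyRange (k : Int) (dp.length : Int) 1).foldl
      (fun (s : List Int × List (String × Int) × String × Int) i =>
        let dc := PySem.List.pyGetD dp i ("", 0)
        if dc.1 = s.2.2.1 then (s.1, s.2.1, s.2.2.1, s.2.2.2 + dc.2)
        else (s.1 ++ [PySem.List.pyGetD np i 0], s.2.1 ++ [(s.2.2.1, s.2.2.2)], dc.1, dc.2)) s
    = pvFoldE np k rest s := by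
  intro rest
  induction rest with
  | nil =>
      intro k s hk
      rw [List.drop_eq_nil_iff] at hk
      rw [PySem.List.pyRange_one_eq_nil (by exact_mod_cast hk)]
      rfl
  | cons dc t ih =>
      intro k s hk
      have hklt : k < dp.length := by
        by_contra h
        rw [List.drop_eq_nil_of_le (by omega)] at hk; cases hk
      have hget : PySem.List.pyGetD dp (k : Int) ("", 0) = dc := by
        rw [PySem.List.pyGetD_natCast]
        have : dp[k]? = some dc := by
          rw [← List.head?_drop, hk]; rfl
        simp [List.getD_eq_getElem?_getD, this]
      rw [PySem.List.pyRange_one_cons (by exact_mod_cast hklt)]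
      rw [List.foldl_cons]
      have hk1 : dp.drop (k + 1) = t := by
        rw [← List.tail_drop, hk]; rfl
      have := ih (k + 1) (if dc.1 = s.2.2.1 then (s.1, s.2.1, s.2.2.1, s.2.2.2 + dc.2)
        else (s.1 ++ [PySem.List.pyGetD np (k : Int) 0], s.2.1 ++ [(s.2.2.1, s.2.2.2)], dc.1, dc.2)) hk1
      push_cast at this ⊢
      simp only [hget] at this ⊢
      rw [pvFoldE]
      by_cases hd : dc.1 = s.2.2.1 <;> simp only [hd, ite_true, ite_false] at this ⊢ <;> exact this

lemma pvFold_skip (np : List Int) :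
    ∀ (rest : List (String × Int)) (k : Nat) (prev : String) (cnt : Int)
      (mn : List Int) (md : List (String × Int)),
    pvFoldE np k rest (mn, md, prev, cnt)
      = pvFoldE np (k + (rest.takeWhile (fun t => t.1 == prev)).length)
          (rest.dropWhile (fun t => t.1 == prev))
          (mn, md, prev, cnt + (((rest.takeWhile (fun t => t.1 == prev)).map Prod.snd).sum)) := by
  intro rest
  induction rest with
  | nil => intro k prev cnt mn md; simp [List.takeWhile, List.dropWhile]
  | cons dc t ih =>
      intro k prev cnt mn md
      by_cases hd : dc.1 = prev
      · rw [List.takeWhile_cons_of_pos (by simpa using hd),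
            List.dropWhile_cons_of_pos (by simpa using hd)]
        rw [pvFoldE]
        simp only [hd, ite_true]
        rw [ih (k + 1) prev (cnt + dc.2) mn md]
        simp only [List.length_cons, List.map_cons, List.sum_cons]
        rw [show k + 1 + (t.takeWhile (fun t => t.1 == prev)).length
              = k + ((t.takeWhile (fun t => t.1 == prev)).length + 1) by omega,
            show cnt + dc.2 + ((t.takeWhile (fun t => t.1 == prev)).map Prod.snd).sum
              = cnt + (dc.2 + ((t.takeWhile (fun t => t.1 == prev)).map Prod.snd).sum) by ring]
      · rw [List.takeWhile_cons_of_neg (by simpa using hd),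
            List.dropWhile_cons_of_neg (by simpa using hd)]
        simp

theorem pvRuns_fold (np : List Int) (rest : List (String × Int)) (k : Nat) (prev : String)
    (cnt : Int) (mn : List Int) (md : List (String × Int)) :
    (pvFoldE np (k + 1) rest (mn, md, prev, cnt)).1
        = mn ++ ((pvRuns ((prev, cnt) :: rest) k).drop 1).map
            (fun r => PySem.List.pyGetD np (r.1 : Int) 0) ∧
    (pvFoldE np (k + 1) rest (mn, md, prev, cnt)).2.1
        ++ [((pvFoldE np (k + 1) rest (mn, md, prev, cnt)).2.2.1,
             (pvFoldE np (k + 1) rest (mn, md, prev, cnt)).2.2.2)]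
      = md ++ (pvRuns ((prev, cnt) :: rest) k).map (fun r => (r.2.1, r.2.2)) := by
  rw [pvFold_skip np rest (k + 1) prev cnt mn md]
  rw [pvRuns]
  rcases hrw : rest.dropWhile (fun t => t.1 == prev) with _ | ⟨⟨d', c'⟩, t⟩
  · rw [hrw]
    simp [pvFoldE, pvRuns]
  · have hlen : t.length < rest.length := by
      have h1 := List.length_dropWhile_le (fun t => t.1 == prev) rest
      rw [hrw] at h1
      simp at h1; omega
    rw [hrw]
    have hne : d' ≠ prev := by
      have := pvDropWhile_head_false (fun t => t.1 == prev) rest _ _ hrw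
      simpa using this
    have harr : k + 1 + (rest.takeWhile (fun t => t.1 == prev)).length
        = k + (rest.takeWhile (fun t => t.1 == prev)).length + 1 := by omega
    rw [harr]
    obtain ⟨ih1, ih2⟩ := pvRuns_fold np t (k + (rest.takeWhile (fun t => t.1 == prev)).length + 1) d' c'
      (mn ++ [PySem.List.pyGetD np
        ((k + (rest.takeWhile (fun t => t.1 == prev)).length + 1 : Nat) : Int) 0])
      (md ++ [(prev, cnt + ((rest.takeWhile (fun t => t.1 == prev)).map Prod.snd).sum)])
    rw [pvFoldE]
    simp only [hne, ite_false]
    refine ⟨?_, ?_⟩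
    · rw [ih1, pvRuns]
      simp only [List.drop_succ_cons, List.drop_zero, List.map_cons, List.append_assoc,
        List.cons_append, List.nil_append, PySem.List.pyGetD_natCast]
    · rw [ih2]
      simp [List.append_assoc]
termination_by rest.length
decreasing_by exact hlen

-- ===== VERDICT (by name: the statement is the Claim_ definition above) =====
theorem combine_paths_spec : Claim_equal_combine_paths := by
  intro np dp _ _
  unfold Spec_combine_paths combine_paths combine_paths_alt
  by_cases h1 : np.length = 1
  · simp [h1]
  · by_cases h2 : dp = []
    · simp [h1, h2]
    · simp only [h1, h2, ite_false]
      rcases dp with _ | ⟨⟨d, c⟩, rest⟩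
      · exact absurd rfl h2
      have hb := pvBridge np ((d, c) :: rest) rest 1
        ([PySem.List.pyGetD np 0 0], [], (PySem.List.pyGetD ((d, c) :: rest) 0 ("", 0)).1,
          (PySem.List.pyGetD ((d, c) :: rest) 0 ("", 0)).2) rfl
      simp only [Nat.cast_one] at hb
      rw [hb]
      have hget0 : PySem.List.pyGetD ((d, c) :: rest) (0 : Int) ("", 0) = (d, c) := by
        simp [PySem.List.pyGetD_zero_cons]
      simp only [hget0]
      obtain ⟨hr1, hr2⟩ := pvRuns_fold np rest 0 d c [PySem.List.pyGetD np 0 0] []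
      simp only [Nat.zero_add] at hr1 hr2
      rw [hr1, hr2]
      simp
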